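-- pv_equiv track=rewrite | github.com/qasim418/Advent_of_Code_2024 | Day_14/day14_solution.py | find_time_until_positions_unique
-- ===== SOURCE A (Python) =====
-- GRID_WIDTH = 101
--
-- GRID_HEIGHT = 103
--
-- def find_time_until_positions_unique(robots):
--     positions = [robot['position'] for robot in robots]
--     velocities = [robot['velocity'] for robot in robots]
--     x_max = GRID_WIDTH
--     y_max = GRID_HEIGHT
--     T = 0
--     while True:
--         distinct_positions = set(positions)
--         if len(distinct_positions) == len(positions):
--             break  # All positions are unique
--         # Update positions
--         for i in range(len(positions)):
--             px, py = positions[i]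
--             vx, vy = velocities[i]
--             positions[i] = ((px + vx) % x_max, (py + vy) % y_max)
--         T += 1
--     return T
-- ===== SOURCE B (Python) =====
-- GRID_WIDTH = 101
--
-- GRID_HEIGHT = 103
--
-- def find_time_until_positions_unique(robots):
--     # If the given positions are already unique the answer is 0.
--     # Otherwise: positions are periodic with period P = 101*103, and at any
--     # t >= 1 every position lies on the grid, so robots i and j coincide at t
--     # iff t solves two linear congruences (mod 101 and mod 103).  Solve them
--     # per pair, combine by CRT (51*103 = 1 mod 101, 51*101 = 1 mod 103) into
--     # the pair's collision times mod P, mark those, and return the first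
--     # unmarked t >= 1.
--     pos = [robot['position'] for robot in robots]
--     vel = [robot['velocity'] for robot in robots]
--     if len(set(pos)) == len(pos):
--         return 0
--     P = GRID_WIDTH * GRID_HEIGHT  # 10403
--     collides = [False] * P
--     n = len(pos)
--     for i in range(n):
--         for j in range(i + 1, n):
--             dx = pos[i][0] - pos[j][0]
--             wx = vel[i][0] - vel[j][0]
--             dy = pos[i][1] - pos[j][1]
--             wy = vel[i][1] - vel[j][1]
--             rxs = [r for r in range(GRID_WIDTH) if (dx + wx * r) % GRID_WIDTH == 0]
--             rys = [r for r in range(GRID_HEIGHT) if (dy + wy * r) % GRID_HEIGHT == 0]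
--             for rx in rxs:
--                 for ry in rys:
--                     collides[51 * (103 * rx + 101 * ry) % P] = True
--     # two robots coincide at t = 0 (mod the grid), hence also at t = P, so the
--     # first collision-free time, if any, lies in 1..P-1
--     for t in range(1, P):
--         if not collides[t]:
--             return t
--     raise ValueError("positions never become unique")
-- ===== Notes on version B (the rewrite author's own statement) =====
-- stated objective: alternative
-- what changed: B does not simulate: after the trivial t=0 check it solves, for every pair of robots, the two linear congruences giving that pair's collision times, combines them by CRT into collision times mod 101*103, marks them in a table, and returns the first unmarked time, replacing A's step-by-step position updates with per-step set-uniqueness tests.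
import Mathlib
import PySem

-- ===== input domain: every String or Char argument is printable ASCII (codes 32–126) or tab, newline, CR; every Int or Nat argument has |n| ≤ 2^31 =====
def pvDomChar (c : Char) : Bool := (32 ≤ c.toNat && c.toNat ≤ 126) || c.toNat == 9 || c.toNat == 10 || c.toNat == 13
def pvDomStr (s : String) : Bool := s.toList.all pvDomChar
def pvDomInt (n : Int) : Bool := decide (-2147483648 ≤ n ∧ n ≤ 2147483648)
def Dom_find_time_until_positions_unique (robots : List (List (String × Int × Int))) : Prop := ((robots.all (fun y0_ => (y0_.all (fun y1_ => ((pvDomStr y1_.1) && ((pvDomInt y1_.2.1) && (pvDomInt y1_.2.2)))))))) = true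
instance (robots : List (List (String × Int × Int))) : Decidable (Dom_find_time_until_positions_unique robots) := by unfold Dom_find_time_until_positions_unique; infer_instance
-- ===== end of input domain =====

-- B replaces A's step-by-step simulation with per-step uniqueness tests by pairwise
-- congruence solving + CRT: it marks every pairwise collision time mod 101*103 in a
-- table and returns the first unmarked time (alternative algorithm, answer-independent cost).


-- ===== PORT A =====
-- one sweep of A's inner for-loop: positions[i] = ((px+vx) % 101, (py+vy) % 103)
def pvStepA (ps vs : List (Int × Int)) : List (Int × Int) :=
  (ps.zip vs).map (fun q => (PySem.Int.mod (q.1.1 + q.2.1) 101, PySem.Int.mod (q.1.2 + q.2.2) 103))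

-- A's 'while True' loop; on inputs admitted by Pre_ the break fires within 10404 checks
-- (positions are periodic in time with period 101*103 = 10403), so the fuel never runs out there.
def pvLoopA : Nat → List (Int × Int) → List (Int × Int) → Int → Int
  | 0, _, _, t => t
  | fuel + 1, ps, vs, t =>
    if (PySem.Set.ofList ps).length = ps.length then t
    else pvLoopA fuel (pvStepA ps vs) vs (t + 1)

-- robot['position'] / robot['velocity'] raise KeyError when the key is absent; Pre_ requires
-- both keys on every robot, so the .getD default is never reached on admitted inputs.
def find_time_until_positions_unique (robots : List (List (String × Int × Int))) : Int :=
  let positions := robots.map (fun r => (PySem.Dict.get? (PySem.Dict.mk r) "position").getD (0, 0))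
  let velocities := robots.map (fun r => (PySem.Dict.get? (PySem.Dict.mk r) "velocity").getD (0, 0))
  pvLoopA 10404 positions velocities 0

-- ===== PORT B =====
-- inner body of Source B's pair loop: solve the two congruences for the pair (i, j) and mark
-- each CRT-combined collision time in the table ('collides[…] = True' = List.set … true);
-- range(101)/range(103) over Nat r with the Int cast written out is exactly Python's range here,
-- and 51*(103*rx+101*ry) % 10403 on Nat equals Python's % on these nonnegative ints.
def pvMarkPair (bad : List Bool) (pi_ pj_ vi_ vj_ : Int × Int) : List Bool :=
  let dx := pi_.1 - pj_.1
  let wx := vi_.1 - vj_.1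
  let dy := pi_.2 - pj_.2
  let wy := vi_.2 - vj_.2
  let rxs : List Nat := (List.range 101).filter (fun r => decide (PySem.Int.mod (dx + wx * (r : Int)) 101 = 0))
  let rys : List Nat := (List.range 103).filter (fun r => decide (PySem.Int.mod (dy + wy * (r : Int)) 103 = 0))
  rxs.foldl (fun b rx => rys.foldl (fun b ry => b.set (51 * (103 * rx + 101 * ry) % 10403) true) b) bad

-- Source B's 'for i in range(n): for j in range(i+1, n): …' over the collides table
-- (range(i+1, n) over these Nat bounds is List.range' (i+1) (n-(i+1)))
def pvPairsFold (pos vel : List (Int × Int)) : List Bool :=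
  let n := pos.length
  (List.range n).foldl (fun bad i =>
    (List.range' (i + 1) (n - (i + 1))).foldl (fun bad j =>
      pvMarkPair bad (pos.getD i (0, 0)) (pos.getD j (0, 0)) (vel.getD i (0, 0)) (vel.getD j (0, 0))) bad)
    (List.replicate 10403 false)

-- Source B's final 'for t in range(1, P): if not collides[t]: return t', rendered as a scan of
-- collides[1:] carrying the counter t (starting at 1); falling off the loop (Source B raises
-- ValueError there, outside Pre_) returns the counter's final value.
def pvFindFirst : List Bool → Int → Int
  | [], t => t
  | b :: rest, t => if b then pvFindFirst rest (t + 1) else t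

def find_time_until_positions_unique_alt (robots : List (List (String × Int × Int))) : Int :=
  let pos := robots.map (fun r => (PySem.Dict.get? (PySem.Dict.mk r) "position").getD (0, 0))
  let vel := robots.map (fun r => (PySem.Dict.get? (PySem.Dict.mk r) "velocity").getD (0, 0))
  if (PySem.Set.ofList pos).length = pos.length then 0
  else pvFindFirst ((pvPairsFold pos vel).drop 1) 1

-- ===== PRECONDITION & SPEC =====
-- the grid position of one robot at time t (used only by Pre_ and the proofs)
def pvPos (p v : Int × Int) (t : Int) : Int × Int :=
  (PySem.Int.mod (p.1 + v.1 * t) 101, PySem.Int.mod (p.2 + v.2 * t) 103)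

def pvPosAt (ps vs : List (Int × Int)) (t : Int) : List (Int × Int) :=
  (ps.zip vs).map (fun q => pvPos q.1 q.2 t)

-- Pre_ is exactly where the Python A returns: every robot carries both keys (otherwise
-- KeyError), and either the given positions are already pairwise distinct (T = 0) or the
-- grid positions are pairwise distinct at some time 1 ≤ t < 10403 (otherwise, by the
-- period 10403 of the motion, they never are and A's while-loop diverges).
def Pre_find_time_until_positions_unique (robots : List (List (String × Int × Int))) : Prop :=
  (robots.all (fun r => (PySem.Dict.contains (PySem.Dict.mk r) "position") && (PySem.Dict.contains (PySem.Dict.mk r) "velocity"))) = true ∧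
  ((robots.map (fun r => (PySem.Dict.get? (PySem.Dict.mk r) "position").getD (0, 0))).Nodup ∨
   ∃ t ∈ Finset.range 10403, 1 ≤ t ∧
     (pvPosAt (robots.map (fun r => (PySem.Dict.get? (PySem.Dict.mk r) "position").getD (0, 0)))
              (robots.map (fun r => (PySem.Dict.get? (PySem.Dict.mk r) "velocity").getD (0, 0))) (t : Int)).Nodup)
instance (robots : List (List (String × Int × Int))) : Decidable (Pre_find_time_until_positions_unique robots) := by
  unfold Pre_find_time_until_positions_unique; infer_instance

def pvWitness_find_time_until_positions_unique : (List (List (String × Int × Int))) :=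
  [[("position", 0, 0), ("velocity", 0, 0)]]

def Spec_find_time_until_positions_unique (robots : List (List (String × Int × Int))) (out : Int) : Prop := out = find_time_until_positions_unique_alt robots
instance (robots : List (List (String × Int × Int))) (out : Int) : Decidable (Spec_find_time_until_positions_unique robots out) := by unfold Spec_find_time_until_positions_unique; infer_instance

-- ===== CLAIM (what is proved, stated in full; the proofs are below) =====
def Claim_equal_find_time_until_positions_unique : Prop := ∀ (robots : List (List (String × Int × Int))), Dom_find_time_until_positions_unique robots → Pre_find_time_until_positions_unique robots → Spec_find_time_until_positions_unique robots (find_time_until_positions_unique robots)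

-- ===== LEMMAS AND PROOFS =====

-- set(xs) keeps first occurrences in order, hence is a sublist of xs
theorem pv_ofList_sublist {a : Type} [BEq a] [LawfulBEq a] (xs : List a) :
    (PySem.Set.ofList xs).Sublist xs := by
  induction xs using List.reverseRecOn with
  | nil => simp [PySem.Set.ofList]
  | append_singleton xs x ih =>
    rw [PySem.Set.ofList_append_singleton, PySem.Set.add]
    split
    · exact ih.trans (List.sublist_append_left xs [x])
    · exact ih.append (List.Sublist.refl [x])

-- len(set(xs)) == len(xs) is exactly Nodup
theorem pv_setlen_iff_nodup {a : Type} [BEq a] [LawfulBEq a] (xs : List a) :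
    (PySem.Set.ofList xs).length = xs.length ↔ xs.Nodup := by
  constructor
  · intro h
    have := (pv_ofList_sublist xs).eq_of_length h
    rw [← this]
    exact PySem.Set.nodup_ofList xs
  · intro h
    rw [PySem.Set.ofList_eq_self_of_nodup xs h]

-- one incremental step from the time-t configuration lands on the time-(t+1) configuration
theorem pvStepA_posAt (ps vs : List (Int × Int)) (t : Int) :
    pvStepA (pvPosAt ps vs t) vs = pvPosAt ps vs (t + 1) := by
  induction ps generalizing vs with
  | nil => simp [pvStepA, pvPosAt]
  | cons p ps ih =>
    cases vs with
    | nil => simp [pvStepA, pvPosAt]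
    | cons v vs =>
      have hx : PySem.Int.mod (PySem.Int.mod (p.1 + v.1 * t) 101 + v.1) 101
          = PySem.Int.mod (p.1 + v.1 * (t + 1)) 101 := by
        rw [PySem.Int.mod_eq_emod_of_pos (by norm_num), PySem.Int.mod_eq_emod_of_pos (by norm_num),
            PySem.Int.mod_eq_emod_of_pos (by norm_num), Int.emod_add_emod]
        ring_nf
      have hy : PySem.Int.mod (PySem.Int.mod (p.2 + v.2 * t) 103 + v.2) 103
          = PySem.Int.mod (p.2 + v.2 * (t + 1)) 103 := by
        rw [PySem.Int.mod_eq_emod_of_pos (by norm_num), PySem.Int.mod_eq_emod_of_pos (by norm_num),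
            PySem.Int.mod_eq_emod_of_pos (by norm_num), Int.emod_add_emod]
        ring_nf
      have ih' := ih vs
      simp only [pvStepA, pvPosAt, pvPos, List.zip_cons_cons, List.map_cons] at ih' ⊢
      exact List.cons_eq_cons.mpr ⟨by rw [hx, hy], ih'⟩

-- the first incremental step from the raw positions is the time-1 configuration
theorem pvStepA_eq_posAt_one (ps vs : List (Int × Int)) :
    pvStepA ps vs = pvPosAt ps vs 1 := by
  simp [pvStepA, pvPosAt, pvPos, mul_one]

-- marking a list of indices in a boolean table
def pvMarks (bad : List Bool) (idxs : List Nat) : List Bool :=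
  idxs.foldl (fun b i => b.set i true) bad

theorem pvMarks_length (bad : List Bool) (idxs : List Nat) :
    (pvMarks bad idxs).length = bad.length := by
  induction idxs generalizing bad with
  | nil => rfl
  | cons i rest ih =>
    have step : pvMarks bad (i :: rest) = pvMarks (bad.set i true) rest := rfl
    rw [step, ih (bad.set i true), List.length_set]

theorem pvMarks_getD (bad : List Bool) (idxs : List Nat) (u : Nat) (hu : u < bad.length) :
    (pvMarks bad idxs).getD u false = (bad.getD u false || decide (u ∈ idxs)) := by
  induction idxs generalizing bad with
  | nil => simp [pvMarks]
  | cons i rest ih =>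
    have step : pvMarks bad (i :: rest) = pvMarks (bad.set i true) rest := rfl
    rw [step, ih (bad.set i true) (by simpa using hu)]
    by_cases hui : u = i
    · subst hui
      have hset : (bad.set u true).getD u false = true := by
        rw [List.getD_eq_getElem?_getD, List.getElem?_set_self hu]; rfl
      rw [hset]
      simp [List.mem_cons]
    · have hset : (bad.set i true).getD u false = bad.getD u false := by
        rw [List.getD_eq_getElem?_getD, List.getElem?_set_ne (fun h => hui h.symm),
            ← List.getD_eq_getElem?_getD]
      rw [hset]
      simp [List.mem_cons, hui]

-- folding over a flatMap is the nested fold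
theorem pv_foldl_flatMap {a b c : Type} (l : List a) (f : a → List b) (g : c → b → c) (init : c) :
    (l.flatMap f).foldl g init = l.foldl (fun acc x => (f x).foldl g acc) init := by
  induction l generalizing init with
  | nil => rfl
  | cons x xs ih => rw [List.flatMap_cons, List.foldl_append, List.foldl_cons, ih]

-- the collision times (mod 10403) of one pair, as Source B computes them
def pvPairTimes (pi_ pj_ vi_ vj_ : Int × Int) : List Nat :=
  ((List.range 101).filter (fun r : Nat => decide (PySem.Int.mod ((pi_.1 - pj_.1) + (vi_.1 - vj_.1) * (r : Int)) 101 = 0))).flatMap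
    (fun rx : Nat => (((List.range 103).filter (fun r : Nat => decide (PySem.Int.mod ((pi_.2 - pj_.2) + (vi_.2 - vj_.2) * (r : Int)) 103 = 0))).map
      (fun ry : Nat => 51 * (103 * rx + 101 * ry) % 10403)))

theorem pvMarkPair_eq_marks (bad : List Bool) (pi_ pj_ vi_ vj_ : Int × Int) :
    pvMarkPair bad pi_ pj_ vi_ vj_ = pvMarks bad (pvPairTimes pi_ pj_ vi_ vj_) := by
  simp only [pvMarkPair, pvPairTimes, pvMarks, pv_foldl_flatMap, List.foldl_map]

-- shifting the argument of the congruence by a multiple of the modulus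
theorem pv_mod_shift (d w t m : Int) (hm : 0 < m) :
    PySem.Int.mod (d + w * (t % m)) m = PySem.Int.mod (d + w * t) m := by
  rw [PySem.Int.mod_eq_emod_of_pos hm, PySem.Int.mod_eq_emod_of_pos hm]
  exact Int.ModEq.add_left d (Int.ModEq.mul_left w (Int.emod_emod_of_dvd t dvd_rfl))

-- the two congruences of a pair hold at u iff the two grid positions coincide at u
theorem pv_collide_iff (pi_ pj_ vi_ vj_ : Int × Int) (u : Int) :
    (PySem.Int.mod ((pi_.1 - pj_.1) + (vi_.1 - vj_.1) * u) 101 = 0 ∧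
     PySem.Int.mod ((pi_.2 - pj_.2) + (vi_.2 - vj_.2) * u) 103 = 0)
    ↔ pvPos pi_ vi_ u = pvPos pj_ vj_ u := by
  have key : ∀ (a b m : Int), 0 < m →
      (PySem.Int.mod ((a - b)) m = 0 ↔ PySem.Int.mod a m = PySem.Int.mod b m) := by
    intro a b m hm
    rw [PySem.Int.mod_eq_emod_of_pos hm, PySem.Int.mod_eq_emod_of_pos hm,
        PySem.Int.mod_eq_emod_of_pos hm]
    constructor
    · intro h
      have hdvd : m ∣ a - b := Int.dvd_iff_emod_eq_zero.mpr h
      have : b ≡ a [ZMOD m] := Int.modEq_iff_dvd.mpr hdvd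
      exact this.symm
    · intro h
      have : b ≡ a [ZMOD m] := Int.ModEq.symm h
      exact Int.dvd_iff_emod_eq_zero.mp (Int.modEq_iff_dvd.mp this)
  have h101 := key (pi_.1 + vi_.1 * u) (pj_.1 + vj_.1 * u) 101 (by norm_num)
  have h103 := key (pi_.2 + vi_.2 * u) (pj_.2 + vj_.2 * u) 103 (by norm_num)
  have e1 : (pi_.1 - pj_.1) + (vi_.1 - vj_.1) * u = (pi_.1 + vi_.1 * u) - (pj_.1 + vj_.1 * u) := by ring
  have e2 : (pi_.2 - pj_.2) + (vi_.2 - vj_.2) * u = (pi_.2 + vi_.2 * u) - (pj_.2 + vj_.2 * u) := by ring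
  rw [e1, e2, h101, h103, pvPos, pvPos, Prod.ext_iff]

-- membership in a pair's collision-time list is exactly coincidence at that time
theorem pv_mem_pairTimes (pi_ pj_ vi_ vj_ : Int × Int) (u : Nat) (hu : u < 10403) :
    u ∈ pvPairTimes pi_ pj_ vi_ vj_ ↔ pvPos pi_ vi_ (u : Int) = pvPos pj_ vj_ (u : Int) := by
  rw [← pv_collide_iff]
  unfold pvPairTimes
  constructor
  · intro hmem
    obtain ⟨rx, hrx, hmem2⟩ := List.mem_flatMap.mp hmem
    obtain ⟨ry, hry, hidx⟩ := List.mem_map.mp hmem2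
    obtain ⟨hrxr, h1⟩ := List.mem_filter.mp hrx
    obtain ⟨hryr, h2⟩ := List.mem_filter.mp hry
    rw [List.mem_range] at hrxr hryr
    rw [decide_eq_true_eq] at h1 h2
    have hx : u % 101 = rx := by omega
    have hy : u % 103 = ry := by omega
    constructor
    · have hsh := pv_mod_shift (pi_.1 - pj_.1) (vi_.1 - vj_.1) (u : Int) 101 (by norm_num)
      rw [← hsh, show ((u : Int) % 101) = ((u % 101 : Nat) : Int) from (Int.natCast_mod u 101).symm, hx]
      exact h1
    · have hsh := pv_mod_shift (pi_.2 - pj_.2) (vi_.2 - vj_.2) (u : Int) 103 (by norm_num)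
      rw [← hsh, show ((u : Int) % 103) = ((u % 103 : Nat) : Int) from (Int.natCast_mod u 103).symm, hy]
      exact h2
  · rintro ⟨h1, h2⟩
    refine List.mem_flatMap.mpr ⟨u % 101,
      List.mem_filter.mpr ⟨List.mem_range.mpr (Nat.mod_lt u (by norm_num)), decide_eq_true ?_⟩,
      List.mem_map.mpr ⟨u % 103,
        List.mem_filter.mpr ⟨List.mem_range.mpr (Nat.mod_lt u (by norm_num)), decide_eq_true ?_⟩, ?_⟩⟩
    · have hsh := pv_mod_shift (pi_.1 - pj_.1) (vi_.1 - vj_.1) (u : Int) 101 (by norm_num)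
      rw [show ((u % 101 : Nat) : Int) = ((u : Int) % 101) from Int.natCast_mod u 101, hsh]
      exact h1
    · have hsh := pv_mod_shift (pi_.2 - pj_.2) (vi_.2 - vj_.2) (u : Int) 103 (by norm_num)
      rw [show ((u % 103 : Nat) : Int) = ((u : Int) % 103) from Int.natCast_mod u 103, hsh]
      exact h2
    · omega

-- all collision times of all pairs, flattened in the order the nested loops visit them
def pvAllTimes (ps vs : List (Int × Int)) : List Nat :=
  (List.range ps.length).flatMap (fun i =>
    (List.range' (i + 1) (ps.length - (i + 1))).flatMap (fun j =>
      pvPairTimes (ps.getD i (0, 0)) (ps.getD j (0, 0)) (vs.getD i (0, 0)) (vs.getD j (0, 0))))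

theorem pvPairsFold_eq (ps vs : List (Int × Int)) :
    pvPairsFold ps vs = pvMarks (List.replicate 10403 false) (pvAllTimes ps vs) := by
  simp only [pvPairsFold, pvAllTimes, pvMarks, pv_foldl_flatMap, pvMarkPair_eq_marks]

theorem pvPairsFold_length (ps vs : List (Int × Int)) :
    (pvPairsFold ps vs).length = 10403 := by
  rw [pvPairsFold_eq, pvMarks_length, List.length_replicate]

theorem pvPosAt_length (ps vs : List (Int × Int)) (h : ps.length = vs.length) (t : Int) :
    (pvPosAt ps vs t).length = ps.length := by
  simp [pvPosAt, List.length_zip, h]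

-- the table holds true at u iff some pair of grid positions coincides at u,
-- i.e. iff the time-u configuration has a duplicate
theorem pvPairsFold_getD (ps vs : List (Int × Int)) (h : ps.length = vs.length)
    (u : Nat) (hu : u < 10403) :
    (pvPairsFold ps vs).getD u false = decide (¬ (pvPosAt ps vs (u : Int)).Nodup) := by
  rw [pvPairsFold_eq, pvMarks_getD _ _ u (by rw [List.length_replicate]; exact hu)]
  have hrep : (List.replicate 10403 false).getD u false = false := by
    rw [List.getD_eq_getElem _ _ (by rw [List.length_replicate]; exact hu)]
    exact List.getElem_replicate _
  rw [hrep, Bool.false_or]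
  have hlen : (pvPosAt ps vs (u : Int)).length = ps.length := pvPosAt_length ps vs h _
  have hget : ∀ (i : Nat), i < ps.length → (pvPosAt ps vs (u : Int))[i]? =
      some (pvPos (ps.getD i (0, 0)) (vs.getD i (0, 0)) (u : Int)) := by
    intro i hi
    have hiz : i < (ps.zip vs).length := by simp [List.length_zip]; omega
    rw [List.getElem?_eq_getElem (by omega)]
    simp only [pvPosAt, List.getElem_map, List.getElem_zip,
      List.getD_eq_getElem ps (0, 0) hi, List.getD_eq_getElem vs (0, 0) (h ▸ hi)]
  have hmem : u ∈ pvAllTimes ps vs ↔ ¬ (pvPosAt ps vs (u : Int)).Nodup := by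
    rw [List.nodup_iff_getElem?_ne_getElem?]
    push_neg
    simp only [pvAllTimes, List.mem_flatMap, List.mem_range, List.mem_range'_1]
    constructor
    · rintro ⟨i, hi, j, ⟨hij, hjn⟩, hmem⟩
      have hjn' : j < ps.length := by omega
      refine ⟨i, j, by omega, by omega, ?_⟩
      rw [hget i hi, hget j hjn']
      exact congrArg some ((pv_mem_pairTimes _ _ _ _ u hu).mp hmem)
    · rintro ⟨i, j, hij, hj, heq⟩
      have hj' : j < ps.length := by omega
      have hi' : i < ps.length := by omega
      rw [hget i hi', hget j hj'] at heq
      refine ⟨i, hi', j, ⟨by omega, by omega⟩, ?_⟩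
      exact (pv_mem_pairTimes _ _ _ _ u hu).mpr (Option.some_injective _ heq)
  by_cases hnod : (pvPosAt ps vs (u : Int)).Nodup
  · have hnm : u ∉ pvAllTimes ps vs := fun hm => (hmem.mp hm) hnod
    simp [hnod, hnm]
  · simp [hnod, hmem.mpr hnod]

-- A's loop from the time-k configuration equals B's scan of the table from index k
theorem pv_bridge (ps vs : List (Int × Int)) (h : ps.length = vs.length) :
    ∀ (m k : Nat), k + m = 10403 → 1 ≤ k →
    (∃ u : Nat, k ≤ u ∧ u < 10403 ∧ (pvPosAt ps vs (u : Int)).Nodup) →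
    pvLoopA (m + 1) (pvPosAt ps vs (k : Int)) vs (k : Int)
      = pvFindFirst ((pvPairsFold ps vs).drop k) (k : Int) := by
  intro m
  induction m with
  | zero =>
    intro k hmk _ hex
    obtain ⟨u, hku, hu, -⟩ := hex
    omega
  | succ m ih =>
    intro k hmk hk1 hex
    obtain ⟨u, hku, hu, hnod⟩ := hex
    have hklt : k < 10403 := lt_of_le_of_lt hku hu
    have hlenC : (pvPairsFold ps vs).length = 10403 := pvPairsFold_length ps vs
    have hdrop : (pvPairsFold ps vs).drop k
        = (pvPairsFold ps vs)[k] :: (pvPairsFold ps vs).drop (k + 1) :=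
      List.drop_eq_getElem_cons (by omega)
    have hgetk : (pvPairsFold ps vs)[k]'(by omega) = decide (¬ (pvPosAt ps vs (k : Int)).Nodup) := by
      rw [← List.getD_eq_getElem _ false (by omega)]
      exact pvPairsFold_getD ps vs h k hklt
    by_cases hnk : (pvPosAt ps vs (k : Int)).Nodup
    · have hset : (PySem.Set.ofList (pvPosAt ps vs (k : Int))).length = (pvPosAt ps vs (k : Int)).length :=
        (pv_setlen_iff_nodup _).mpr hnk
      rw [hdrop]
      have hfalse : (pvPairsFold ps vs)[k]'(by omega) = false := by simp [hgetk, hnk]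
      rw [hfalse]
      simp [pvLoopA, pvFindFirst, hset]
    · have htrue : (pvPairsFold ps vs)[k]'(by omega) = true := by simp [hgetk, hnk]
      rw [hdrop, htrue]
      have hsetne : ¬ (PySem.Set.ofList (pvPosAt ps vs (k : Int))).length = (pvPosAt ps vs (k : Int)).length := by
        rw [pv_setlen_iff_nodup]; exact hnk
      have hune : k ≠ u := by rintro rfl; exact hnk hnod
      have hstep : pvLoopA (m + 1 + 1) (pvPosAt ps vs (k : Int)) vs (k : Int)
          = pvLoopA (m + 1) (pvPosAt ps vs ((k : Int) + 1)) vs ((k : Int) + 1) := by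
        rw [pvLoopA]
        simp only [hsetne, if_false, pvStepA_posAt]
      have hcast : ((k : Int) + 1) = (((k + 1 : Nat)) : Int) := by push_cast; ring
      rw [hstep, hcast, ih (k + 1) (by omega) (by omega) ⟨u, by omega, hu, hnod⟩]
      simp [pvFindFirst]

-- ===== VERDICT (by name: the statement is the Claim_ definition above) =====
theorem find_time_until_positions_unique_spec : Claim_equal_find_time_until_positions_unique := by
  intro robots _ hpre
  obtain ⟨-, hcase⟩ := hpre
  unfold Spec_find_time_until_positions_unique
  unfold find_time_until_positions_unique find_time_until_positions_unique_alt
  simp only []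
  set ps := robots.map (fun r => (PySem.Dict.get? (PySem.Dict.mk r) "position").getD ((0 : Int), (0 : Int))) with hps
  set vs := robots.map (fun r => (PySem.Dict.get? (PySem.Dict.mk r) "velocity").getD ((0 : Int), (0 : Int))) with hvs
  have hlen : ps.length = vs.length := by simp [hps, hvs]
  by_cases h0 : (PySem.Set.ofList ps).length = ps.length
  · show pvLoopA (10403 + 1) ps vs 0 = _
    rw [pvLoopA]
    simp [h0]
  · have hnodup0 : ¬ ps.Nodup := fun hn => h0 ((pv_setlen_iff_nodup ps).mpr hn)
    have hex : ∃ u : Nat, 1 ≤ u ∧ u < 10403 ∧ (pvPosAt ps vs (u : Int)).Nodup := by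
      rcases hcase with hraw | ⟨t, htr, ht1, hnod⟩
      · exact absurd hraw hnodup0
      · exact ⟨t, ht1, by simpa using htr, hnod⟩
    show pvLoopA (10403 + 1) ps vs 0 = _
    rw [pvLoopA]
    simp only [h0, if_false]
    rw [pvStepA_eq_posAt_one]
    have hb := pv_bridge ps vs hlen 10402 1 (by norm_num) (le_refl 1) hex
    norm_num at hb
    rw [show ((0 : Int) + 1) = (1 : Int) by norm_num, hb]
    simp
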